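-- pv_equiv track=rewrite | github.com/paytongagne/ADS | solutions/paytongagne/DriversLicense.py | process_operations
-- ===== SOURCE A (Python) =====
-- class PointBasedManagementSystem:
--     def __init__(self):
--         # Initializes storage for driver points and count array for points distribution
--         self.data = {}
--         self.arr = [0 for _ in range(16)]
--         # Complexity: O(1)
--
--     def nuevo(self, key):
--         # Registers a new driver with maximum points, raises error if driver already exists
--         if key in self.data:
--             raise ValueError("Conductor duplicado")
--         self.data[key] = 15
--         self.arr[15] += 1
--         # Complexity: O(1)
--
--     def consultar(self, key):
--         # Returns the current points of a driver, raises error if driver doesn't exist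
--         if key not in self.data:
--             raise ValueError("Conductor inexistente")
--         return self.data[key]
--         # Complexity: O(1)
--
--     def quitar(self, key, new_value):
--         # Deducts points from a driver, adjusts points array accordingly, raises error if driver doesn't exist
--         if key not in self.data:
--             raise ValueError("Conductor inexistente")
--
--         current_points = self.data[key]
--         new_points = max(0, current_points - new_value)
--         self.arr[current_points] -= 1
--         self.arr[new_points] += 1
--         self.data[key] = new_points
--         # Complexity: O(1)
--
--     def cuantos_con_puntos(self, value):
--         # Returns the number of drivers with a specific points value, raises error if points are out of valid range
--         if not (0 <= value <= 15):
--             raise ValueError("Puntos no validos")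
--         return self.arr[value]
--
-- def process_operations(operations):
--     system = PointBasedManagementSystem()
--     output = []
--
--     for op in operations:
--         parts = op.split()
--         command = parts[0]
--         try:
--             if command == "nuevo":
--                 system.nuevo(parts[1])
--             elif command == "quitar":
--                 system.quitar(parts[1], int(parts[2]))
--             elif command == "consultar":
--                 points = system.consultar(parts[1])
--                 output.append(f"Puntos de {parts[1]}: {points}")
--             elif command == "cuantos_con_puntos":
--                 count = system.cuantos_con_puntos(int(parts[1]))
--                 output.append(f"Con {parts[1]} puntos hay {count}")
--         except ValueError as e:
--             output.append(f"ERROR: {e}")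
--     return output
-- ===== SOURCE B (Python) =====
-- def process_operations(operations):
--     # same output as A; keeps only the points dict and counts on demand
--     points = {}
--     output = []
--     for op in operations:
--         parts = op.split()
--         command = parts[0]
--         if command == "nuevo":
--             key = parts[1]
--             if key in points:
--                 output.append("ERROR: Conductor duplicado")
--             else:
--                 points[key] = 15
--         elif command == "quitar":
--             key = parts[1]
--             try:
--                 amount = int(parts[2])
--             except ValueError as e:
--                 output.append(f"ERROR: {e}")
--                 continue
--             if key in points:
--                 points[key] = max(0, points[key] - amount)
--             else:
--                 output.append("ERROR: Conductor inexistente")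
--         elif command == "consultar":
--             key = parts[1]
--             if key in points:
--                 output.append(f"Puntos de {key}: {points[key]}")
--             else:
--                 output.append("ERROR: Conductor inexistente")
--         elif command == "cuantos_con_puntos":
--             try:
--                 value = int(parts[1])
--             except ValueError as e:
--                 output.append(f"ERROR: {e}")
--                 continue
--             if 0 <= value <= 15:
--                 count = sum(1 for p in points.values() if p == value)
--                 output.append(f"Con {parts[1]} puntos hay {count}")
--             else:
--                 output.append("ERROR: Puntos no validos")
--     return output
-- ===== Notes on version B (the rewrite author's own statement) =====
-- stated objective: simpler
-- what changed: B drops A's class and its maintained 16-slot count array: a plain dict of points is updated directly with explicit if/else branches (only int() kept under try/except so the same error line is printed), and cuantos_con_puntos recounts the dict values on demand.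
-- outside the precondition, e.g. on process_operations(['nuevo a', 'quitar a -1']): A raises IndexError, B returns []
import Mathlib
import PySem

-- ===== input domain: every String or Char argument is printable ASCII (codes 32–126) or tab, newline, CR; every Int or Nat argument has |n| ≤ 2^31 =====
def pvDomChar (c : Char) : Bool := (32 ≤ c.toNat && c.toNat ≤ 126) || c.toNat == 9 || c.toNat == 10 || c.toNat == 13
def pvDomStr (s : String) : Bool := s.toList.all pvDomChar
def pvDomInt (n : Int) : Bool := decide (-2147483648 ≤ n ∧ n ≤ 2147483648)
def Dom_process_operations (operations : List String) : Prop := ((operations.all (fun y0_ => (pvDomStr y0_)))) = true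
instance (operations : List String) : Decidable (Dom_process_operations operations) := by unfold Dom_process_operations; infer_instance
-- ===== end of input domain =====

-- B drops A's maintained 16-slot count array and try/except dispatch: one dict of points,
-- explicit branches, and cuantos_con_puntos recounts the dict values on demand (objective: simpler).

-- shared semantics of Python's str(ValueError) for a failing int(s): CPython prints
-- "invalid literal for int() with base 10: " + repr(s); exact for the whitespace-free
-- printable-ASCII strings that str.split() yields inside Dom_
def pvRepr (s : String) : String :=
  let cs := s.toList
  let q : Char := if cs.contains '\'' && !(cs.contains '"') then '"' else '\''
  String.ofList ([q] ++ cs.flatMap (fun c =>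
    if c = '\\' then ['\\', '\\'] else if c = q then ['\\', q] else [c]) ++ [q])

def pvIntErrMsg (s : String) : String :=
  "ERROR: invalid literal for int() with base 10: " ++ pvRepr s

-- ===== PORT A =====

-- 'self.arr[i] += dv'; exact for 0 ≤ i < arr.length, the only indices reached inside Pre_
def pvArrAdd (arr : List Int) (i : Int) (dv : Int) : List Int :=
  arr.set i.toNat (arr.getD i.toNat 0 + dv)

def pvA_nuevo (data : PySem.Dict String Int) (arr : List Int) (key : String) :
    Except String (PySem.Dict String Int × List Int) :=
  if data.contains key then .error "Conductor duplicado"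
  else .ok (data.insert key 15, pvArrAdd arr 15 1)

def pvA_consultar (data : PySem.Dict String Int) (key : String) : Except String Int :=
  if !(data.contains key) then .error "Conductor inexistente"
  else .ok (data.getD key 0)

def pvA_quitar (data : PySem.Dict String Int) (arr : List Int) (key : String) (new_value : Int) :
    Except String (PySem.Dict String Int × List Int) :=
  if !(data.contains key) then .error "Conductor inexistente"
  else
    let current_points := data.getD key 0
    let new_points := max 0 (current_points - new_value)
    .ok (data.insert key new_points, pvArrAdd (pvArrAdd arr current_points (-1)) new_points 1)

def pvA_cuantos (arr : List Int) (value : Int) : Except String Int :=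
  if !(decide (0 ≤ value ∧ value ≤ 15)) then .error "Puntos no validos"
  else .ok (arr.getD value.toNat 0)

-- the dispatcher loop body; parts[0]/parts[1]/parts[2] raise IndexError where Pre_ excludes,
-- so the in-range '.getD' reads are exact inside Pre_; a failing int() is the caught
-- ValueError whose message pvIntErrMsg renders
def pvStepA (st : PySem.Dict String Int × List Int × List String) (op : String) :
    PySem.Dict String Int × List Int × List String :=
  let data := st.1
  let arr := st.2.1
  let output := st.2.2
  let parts := PySem.Str.split₀ op
  let command := parts.getD 0 ""
  if command == "nuevo" then
    match pvA_nuevo data arr (parts.getD 1 "") with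
    | .ok (d, a) => (d, a, output)
    | .error e => (data, arr, output ++ ["ERROR: " ++ e])
  else if command == "quitar" then
    match PySem.Int.ofStr? (parts.getD 2 "") with
    | none => (data, arr, output ++ [pvIntErrMsg (parts.getD 2 "")])
    | some n =>
      match pvA_quitar data arr (parts.getD 1 "") n with
      | .ok (d, a) => (d, a, output)
      | .error e => (data, arr, output ++ ["ERROR: " ++ e])
  else if command == "consultar" then
    match pvA_consultar data (parts.getD 1 "") with
    | .ok points => (data, arr, output ++ ["Puntos de " ++ parts.getD 1 "" ++ ": " ++ PySem.Int.toStr points])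
    | .error e => (data, arr, output ++ ["ERROR: " ++ e])
  else if command == "cuantos_con_puntos" then
    match PySem.Int.ofStr? (parts.getD 1 "") with
    | none => (data, arr, output ++ [pvIntErrMsg (parts.getD 1 "")])
    | some v =>
      match pvA_cuantos arr v with
      | .ok count => (data, arr, output ++ ["Con " ++ parts.getD 1 "" ++ " puntos hay " ++ PySem.Int.toStr count])
      | .error e => (data, arr, output ++ ["ERROR: " ++ e])
  else st

def process_operations (operations : List String) : List String :=
  (operations.foldl pvStepA (PySem.Dict.empty, List.replicate 16 0, [])).2.2

-- ===== PORT B =====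

def pvStepB (st : PySem.Dict String Int × List String) (op : String) :
    PySem.Dict String Int × List String :=
  let points := st.1
  let output := st.2
  let parts := PySem.Str.split₀ op
  let command := parts.getD 0 ""
  if command == "nuevo" then
    let key := parts.getD 1 ""
    if points.contains key then (points, output ++ ["ERROR: Conductor duplicado"])
    else (points.insert key 15, output)
  else if command == "quitar" then
    let key := parts.getD 1 ""
    match PySem.Int.ofStr? (parts.getD 2 "") with
    | none => (points, output ++ [pvIntErrMsg (parts.getD 2 "")])
    | some amount =>
      if points.contains key then (points.insert key (max 0 (points.getD key 0 - amount)), output)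
      else (points, output ++ ["ERROR: Conductor inexistente"])
  else if command == "consultar" then
    let key := parts.getD 1 ""
    if points.contains key then (points, output ++ ["Puntos de " ++ key ++ ": " ++ PySem.Int.toStr (points.getD key 0)])
    else (points, output ++ ["ERROR: Conductor inexistente"])
  else if command == "cuantos_con_puntos" then
    match PySem.Int.ofStr? (parts.getD 1 "") with
    | none => (points, output ++ [pvIntErrMsg (parts.getD 1 "")])
    | some value =>
      if 0 ≤ value ∧ value ≤ 15 then
        let count := points.values.foldl (fun acc p => if p == value then acc + 1 else acc) (0 : Int)
        (points, output ++ ["Con " ++ parts.getD 1 "" ++ " puntos hay " ++ PySem.Int.toStr count])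
      else (points, output ++ ["ERROR: Puntos no validos"])
  else st

def process_operations_alt (operations : List String) : List String :=
  (operations.foldl pvStepB (PySem.Dict.empty, [])).2

-- ===== PRECONDITION & SPEC =====

-- Pre_ excludes only ops on which A raises an uncaught exception or may do so: a blank op or a
-- missing argument (IndexError), and a 'quitar' with a negative parsed amount, which makes A
-- index its 16-slot count array past 15 (IndexError) whenever the driver exists with enough
-- points; the negative-amount exclusion over-approximates that state-dependent crash, and on
-- the excluded negative-amount inputs where A does return, B returns the same value.
def pvPreOp (op : String) : Bool :=
  -- satisfied e.g. by "nuevo ana", "quitar ana 7", "quitar bob 0x7", "consultar ana",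
  -- "cuantos_con_puntos 8", "cuantos_con_puntos x", "nuevo a\\b", "consultar 'x'";
  -- violated e.g. by "nuevo" (missing argument: IndexError) and "quitar ana -2"
  let parts := PySem.Str.split₀ op
  let c := parts.getD 0 ""
  !parts.isEmpty &&
  (!(c == "nuevo") || decide (2 ≤ parts.length)) &&
  (!(c == "consultar") || decide (2 ≤ parts.length)) &&
  (!(c == "quitar") || (decide (3 ≤ parts.length) &&
      decide (0 ≤ (PySem.Int.ofStr? (parts.getD 2 "")).getD 0))) &&
  (!(c == "cuantos_con_puntos") || decide (2 ≤ parts.length))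

def Pre_process_operations (operations : List String) : Prop :=
  ∀ op ∈ operations, pvPreOp op = true
instance (operations : List String) : Decidable (Pre_process_operations operations) := by
  unfold Pre_process_operations; infer_instance

def pvWitness_process_operations : List String :=
  ["nuevo ana", "nuevo ana", "quitar ana 7", "consultar ana", "quitar ana 0x7",
   "cuantos_con_puntos 8", "quitar eva 2", "cuantos_con_puntos x", "cuantos_con_puntos 99"]

def Spec_process_operations (operations : List String) (out : List String) : Prop :=
  out = process_operations_alt operations
instance (operations : List String) (out : List String) : Decidable (Spec_process_operations operations out) := by
  unfold Spec_process_operations; infer_instance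

-- ===== CLAIM (what is proved, stated in full; the proofs are below) =====
def Claim_equal_process_operations : Prop := ∀ (operations : List String), Dom_process_operations operations → Pre_process_operations operations → Spec_process_operations operations (process_operations operations)

-- ===== LEMMAS AND PROOFS =====

-- the simulation invariant: A's count array tabulates B's value counts, values stay in 0..15
def pvInv (data : PySem.Dict String Int) (arr : List Int) : Prop :=
  arr.length = 16 ∧ data.keys.Nodup ∧
  (∀ p ∈ data.values, 0 ≤ p ∧ p ≤ 15) ∧
  (∀ i : Nat, i < 16 → arr.getD i 0 = (data.values.count ((i : Int)) : Int))

lemma length_pvArrAdd (arr : List Int) (i dv : Int) : (pvArrAdd arr i dv).length = arr.length := by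
  simp [pvArrAdd]

lemma getD_pvArrAdd_self (arr : List Int) (i dv : Int) (h : i.toNat < arr.length) :
    (pvArrAdd arr i dv).getD i.toNat 0 = arr.getD i.toNat 0 + dv := by
  simp [pvArrAdd, List.getD, h]

lemma getD_pvArrAdd_ne (arr : List Int) (i dv : Int) (j : Nat) (h : i.toNat ≠ j) :
    (pvArrAdd arr i dv).getD j 0 = arr.getD j 0 := by
  simp [pvArrAdd, List.getD, h]

lemma values_insert_fresh (d : PySem.Dict String Int) (k : String) (v : Int)
    (h : d.contains k = false) : (d.insert k v).values = d.values ++ [v] := by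
  simp [PySem.Dict.values, PySem.Dict.items_insert_of_not_contains d v h]

lemma count_map_replace (l : List (String × Int)) (k : String) (cp w x : Int)
    (hnd : (l.map Prod.fst).Nodup) (hmem : (k, cp) ∈ l) :
    ((l.map (fun p => if (p.1 == k) = true then (k, w) else p)).map Prod.snd).count x
      + (if cp = x then 1 else 0)
    = (l.map Prod.snd).count x + (if w = x then 1 else 0) := by
  induction l with
  | nil => cases hmem
  | cons p t ih =>
    simp only [List.map_cons, List.nodup_cons] at hnd
    obtain ⟨hp, hnd'⟩ := hnd
    rcases List.mem_cons.mp hmem with heq | hmem'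
    · have hp1 : p.1 = k := by rw [← heq]
      have hp2 : p.2 = cp := by rw [← heq]
      have hcond : (if (p.1 == k) = true then (k, w) else p) = (k, w) := by
        rw [hp1]; simp
      have htail : t.map (fun q => if (q.1 == k) = true then (k, w) else q) = t := by
        have hq : ∀ q ∈ t, (if (q.1 == k) = true then (k, w) else q) = q := by
          intro q hq
          have hqk : q.1 ≠ k := by
            intro h
            exact hp (by rw [hp1, ← h]; exact List.mem_map_of_mem hq)
          simp [hqk]
        rw [List.map_congr_left hq]; simp
      rw [List.map_cons, hcond, htail, List.map_cons, List.map_cons,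
        List.count_cons, List.count_cons, hp2]
      simp only [beq_iff_eq]
      split_ifs <;> omega
    · have hp1 : p.1 ≠ k := by
        intro h
        exact hp (by rw [h]; exact List.mem_map.mpr ⟨(k, cp), hmem', rfl⟩)
      have hrec := ih hnd' hmem'
      have hcond : (if (p.1 == k) = true then (k, w) else p) = p := by
        simp [hp1]
      rw [List.map_cons, hcond, List.map_cons, List.map_cons,
        List.count_cons, List.count_cons]
      simp only [beq_iff_eq] at hrec ⊢
      split_ifs at hrec ⊢ <;> omega

lemma count_values_insert_existing (d : PySem.Dict String Int) (k : String) (cp w x : Int)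
    (hnd : d.keys.Nodup) (hget : d.get? k = some cp) :
    ((d.insert k w).values.count x) + (if cp = x then 1 else 0)
      = d.values.count x + (if w = x then 1 else 0) := by
  have hc : d.contains k = true := by
    rw [PySem.Dict.contains_eq_isSome_get?, hget]; rfl
  have hmem : (k, cp) ∈ d.items := PySem.Dict.mem_items_of_get?_eq_some d hget
  have := count_map_replace d.items k cp w x (by simpa [PySem.Dict.keys] using hnd) hmem
  simpa [PySem.Dict.values, PySem.Dict.items_insert_of_contains d w hc] using this

lemma mem_values_of_get (d : PySem.Dict String Int) (k : String) (cp : Int)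
    (hget : d.get? k = some cp) : cp ∈ d.values := by
  have hmem : (k, cp) ∈ d.items := PySem.Dict.mem_items_of_get?_eq_some d hget
  simp only [PySem.Dict.values]
  exact List.mem_map.mpr ⟨(k, cp), hmem, rfl⟩

set_option maxHeartbeats 3200000 in
lemma step_sim (op : String) (hop : pvPreOp op = true)
    (d : PySem.Dict String Int) (arr : List Int) (out : List String) (hinv : pvInv d arr) :
    (pvStepA (d, arr, out) op).1 = (pvStepB (d, out) op).1 ∧
    (pvStepA (d, arr, out) op).2.2 = (pvStepB (d, out) op).2 ∧
    pvInv (pvStepA (d, arr, out) op).1 (pvStepA (d, arr, out) op).2.1 := by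
  obtain ⟨hlen, hnodup, hrange, hcount⟩ := hinv
  simp only [pvPreOp, Bool.and_eq_true] at hop
  obtain ⟨⟨⟨⟨hne0, hnu⟩, hco⟩, hqu⟩, hcu⟩ := hop
  simp only [pvStepA, pvStepB]
  by_cases h1 : (PySem.Str.split₀ op).getD 0 "" = "nuevo"
  · -- nuevo
    simp only [h1, beq_self_eq_true, if_true, pvA_nuevo]
    by_cases hk : d.contains ((PySem.Str.split₀ op).getD 1 "") = true
    · simp only [hk, if_true]
      exact ⟨by trivial, by trivial, hlen, hnodup, hrange, hcount⟩
    · rw [Bool.not_eq_true] at hk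
      simp only [hk, Bool.false_eq_true, if_false]
      refine ⟨by trivial, by trivial, by simpa [pvArrAdd] using hlen,
        PySem.Dict.nodup_keys_insert _ _ _ hnodup, ?_, ?_⟩
      · intro p hp
        rw [values_insert_fresh _ _ _ hk] at hp
        rcases List.mem_append.mp hp with h | h
        · exact hrange p h
        · simp only [List.mem_singleton] at h
          omega
      · intro i hi
        rw [values_insert_fresh _ _ _ hk, List.count_append]
        have h15 : ((15 : Int)).toNat = 15 := rfl
        by_cases hii : i = 15
        · subst hii
          rw [show (15 : Nat) = ((15 : Int)).toNat from rfl,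
            getD_pvArrAdd_self arr 15 1 (by rw [hlen]; norm_num), h15, hcount 15 (by norm_num)]
          norm_num [List.count_singleton]
        · rw [getD_pvArrAdd_ne arr 15 1 i (by rw [h15]; omega), hcount i hi]
          have hnot : ((i : Nat) : Int) ∉ ([15] : List Int) := by
            simp only [List.mem_singleton]; intro h; omega
          rw [List.count_eq_zero.mpr hnot]
          simp
  · have hb1 : ((PySem.Str.split₀ op).getD 0 "" == "nuevo") = false := by
      rw [beq_eq_false_iff_ne]; exact h1
    simp only [hb1, Bool.false_eq_true, if_false]
    by_cases h2 : (PySem.Str.split₀ op).getD 0 "" = "quitar"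
    · -- quitar
      simp only [h2, beq_self_eq_true, if_true, pvA_quitar] at hqu ⊢
      simp only [Bool.not_true, Bool.false_or, Bool.and_eq_true, decide_eq_true_eq] at hqu
      obtain ⟨hlen3, hn0⟩ := hqu
      cases hs : PySem.Int.ofStr? ((PySem.Str.split₀ op).getD 2 "") with
      | none =>
        exact ⟨by trivial, by trivial, hlen, hnodup, hrange, hcount⟩
      | some n =>
        have hn : 0 ≤ n := by
          rw [hs] at hn0; simpa using hn0
        set key := (PySem.Str.split₀ op).getD 1 "" with hkey
        by_cases hk : d.contains key = true
        · simp only [hk, Bool.not_true, Bool.false_eq_true, if_false, if_true]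
          have hks : (d.get? key).isSome = true := by
            rw [← PySem.Dict.contains_eq_isSome_get?]; exact hk
          obtain ⟨cp, hget⟩ := Option.isSome_iff_exists.mp hks
          have hcpD : d.getD key 0 = cp := by
            rw [PySem.Dict.getD_eq_get?_getD, hget]; rfl
          have hcpmem : cp ∈ d.values := mem_values_of_get d key cp hget
          have hcpb : 0 ≤ cp ∧ cp ≤ 15 := hrange cp hcpmem
          rw [hcpD]
          set np := max 0 (cp - n) with hnp
          have hnpb : 0 ≤ np ∧ np ≤ 15 := by omega
          have hl1 : (pvArrAdd arr cp (-1)).length = 16 := by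
            rw [length_pvArrAdd, hlen]
          refine ⟨by trivial, by trivial, ?_,
            PySem.Dict.nodup_keys_insert _ _ _ hnodup, ?_, ?_⟩
          · simp only [length_pvArrAdd]; exact hlen
          · intro p hp
            rcases PySem.Dict.mem_values_insert _ _ _ _ hp with h | h
            · omega
            · exact hrange p h
          · intro i hi
            have hE := count_values_insert_existing d key cp np ((i : Nat) : Int) hnodup hget
            have g1 : (pvArrAdd arr cp (-1)).getD i 0
                = arr.getD i 0 + (if cp = ((i : Nat) : Int) then -1 else 0) := by
              by_cases e : cp = ((i : Nat) : Int)
              · have e' : cp.toNat = i := by omega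
                rw [if_pos e, ← e', getD_pvArrAdd_self arr cp (-1) (by omega)]
              · have e' : cp.toNat ≠ i := by omega
                rw [if_neg e, getD_pvArrAdd_ne arr cp (-1) i e', add_zero]
            have g2 : (pvArrAdd (pvArrAdd arr cp (-1)) np 1).getD i 0
                = (pvArrAdd arr cp (-1)).getD i 0 + (if np = ((i : Nat) : Int) then 1 else 0) := by
              by_cases e : np = ((i : Nat) : Int)
              · have e' : np.toNat = i := by omega
                rw [if_pos e, ← e', getD_pvArrAdd_self _ np 1 (by omega)]
              · have e' : np.toNat ≠ i := by omega
                rw [if_neg e, getD_pvArrAdd_ne _ np 1 i e', add_zero]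
            rw [g2, g1, hcount i hi]
            push_cast at hE
            split_ifs at hE ⊢ <;> omega
        · rw [Bool.not_eq_true] at hk
          simp only [hk, Bool.not_false, if_true, Bool.false_eq_true, if_false]
          exact ⟨by trivial, by trivial, hlen, hnodup, hrange, hcount⟩
    · have hb2 : ((PySem.Str.split₀ op).getD 0 "" == "quitar") = false := by
        rw [beq_eq_false_iff_ne]; exact h2
      simp only [hb2, Bool.false_eq_true, if_false]
      by_cases h3 : (PySem.Str.split₀ op).getD 0 "" = "consultar"
      · -- consultar
        simp only [h3, beq_self_eq_true, if_true, pvA_consultar]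
        by_cases hk : d.contains ((PySem.Str.split₀ op).getD 1 "") = true
        · simp only [hk, Bool.not_true, Bool.false_eq_true, if_false, if_true]
          exact ⟨by trivial, by trivial, hlen, hnodup, hrange, hcount⟩
        · rw [Bool.not_eq_true] at hk
          simp only [hk, Bool.not_false, if_true, Bool.false_eq_true, if_false]
          exact ⟨by trivial, by trivial, hlen, hnodup, hrange, hcount⟩
      · have hb3 : ((PySem.Str.split₀ op).getD 0 "" == "consultar") = false := by
          rw [beq_eq_false_iff_ne]; exact h3
        simp only [hb3, Bool.false_eq_true, if_false]
        by_cases h4 : (PySem.Str.split₀ op).getD 0 "" = "cuantos_con_puntos"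
        · -- cuantos_con_puntos
          simp only [h4, beq_self_eq_true, if_true, pvA_cuantos]
          cases hs : PySem.Int.ofStr? ((PySem.Str.split₀ op).getD 1 "") with
          | none =>
            exact ⟨by trivial, by trivial, hlen, hnodup, hrange, hcount⟩
          | some v =>
            by_cases hvr : 0 ≤ v ∧ v ≤ 15
            · have hd : decide (0 ≤ v ∧ v ≤ 15) = true := decide_eq_true hvr
              have harr : arr.getD v.toNat 0
                  = d.values.foldl (fun acc p => if p == v then acc + 1 else acc) (0 : Int) := by
                rw [PySem.List.foldl_beq_add_one]
                have hvt : ((v.toNat : Nat) : Int) = v := by omega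
                have := hcount v.toNat (by omega)
                rw [hvt] at this
                rw [this]; ring
              simp only [hd, Bool.not_true, Bool.false_eq_true, if_false, if_pos hvr, harr]
              exact ⟨by trivial, by trivial, hlen, hnodup, hrange, hcount⟩
            · have hd : decide (0 ≤ v ∧ v ≤ 15) = false := decide_eq_false hvr
              simp only [hd, Bool.not_false, if_true, if_neg hvr]
              exact ⟨by trivial, by trivial, hlen, hnodup, hrange, hcount⟩
        · have hb4 : ((PySem.Str.split₀ op).getD 0 "" == "cuantos_con_puntos") = false := by
            rw [beq_eq_false_iff_ne]; exact h4
          simp only [hb4, Bool.false_eq_true, if_false]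
          exact ⟨by trivial, by trivial, hlen, hnodup, hrange, hcount⟩

lemma fold_sim (ops : List String) :
    ∀ (d : PySem.Dict String Int) (arr : List Int) (out : List String),
      (∀ op ∈ ops, pvPreOp op = true) → pvInv d arr →
      (ops.foldl pvStepA (d, arr, out)).2.2 = (ops.foldl pvStepB (d, out)).2 := by
  induction ops with
  | nil => intro d arr out _ _; rfl
  | cons op t ih =>
    intro d arr out hops hinv
    have hop : pvPreOp op = true := hops op (List.mem_cons_self ..)
    obtain ⟨h1, h2, h3⟩ := step_sim op hop d arr out hinv
    have hB : pvStepB (d, out) op =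
        ((pvStepA (d, arr, out) op).1, (pvStepA (d, arr, out) op).2.2) := by
      rw [h1, h2]
    have hA : pvStepA (d, arr, out) op =
        ((pvStepA (d, arr, out) op).1, (pvStepA (d, arr, out) op).2.1,
         (pvStepA (d, arr, out) op).2.2) := rfl
    simp only [List.foldl_cons]
    rw [hB, hA]
    exact ih _ _ _ (fun o ho => hops o (List.mem_cons_of_mem _ ho)) h3

lemma inv_init : pvInv PySem.Dict.empty (List.replicate 16 0) := by
  refine ⟨by simp, by simp [PySem.Dict.keys, PySem.Dict.empty], ?_, ?_⟩
  · intro p hp; simp [PySem.Dict.values, PySem.Dict.empty] at hp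
  · intro i hi
    simp only [PySem.Dict.values, PySem.Dict.empty]
    interval_cases i <;> rfl

-- ===== VERDICT (by name: the statement is the Claim_ definition above) =====
theorem process_operations_spec : Claim_equal_process_operations := by
  intro ops _ hpre
  unfold Spec_process_operations process_operations process_operations_alt
  exact fold_sim ops _ _ _ hpre inv_init
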